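-- pv_equiv track=rewrite | github.com/sidb95/code-problems | hackerrank/practice/jim-and-the-orders.py | jimOrders
-- ===== SOURCE A (Python) =====
-- def jimOrders(orders):
--     dict1 = {}
--     nums = []
--     n = len(orders)
--     for i in range(0, n):
--         if (orders[i][1] in dict1):
--             dict1[orders[i][1]].append(orders[i][0])
--         else:
--             dict1[orders[i][1]] = [orders[i][0]]
--     k = sorted(list(dict1.keys()))
--     for key in k:
--         dict1[key] = sorted(dict1[key])
--         for j in range(0, len(dict1[key])):
--             nums.append(dict1[key][j])
--     return nums
-- ===== SOURCE B (Python) =====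
-- def jimOrders(orders):
--     return [o[0] for o in sorted(orders, key=lambda o: (o[1], o[0]))]
-- ===== Notes on version B (the rewrite author's own statement) =====
-- stated objective: simpler
-- what changed: Replaces A's dict-of-buckets grouping followed by a key sort and per-bucket sorts with a single lexicographic sort of the orders by (time, id) and a projection to the ids.
import Mathlib
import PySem

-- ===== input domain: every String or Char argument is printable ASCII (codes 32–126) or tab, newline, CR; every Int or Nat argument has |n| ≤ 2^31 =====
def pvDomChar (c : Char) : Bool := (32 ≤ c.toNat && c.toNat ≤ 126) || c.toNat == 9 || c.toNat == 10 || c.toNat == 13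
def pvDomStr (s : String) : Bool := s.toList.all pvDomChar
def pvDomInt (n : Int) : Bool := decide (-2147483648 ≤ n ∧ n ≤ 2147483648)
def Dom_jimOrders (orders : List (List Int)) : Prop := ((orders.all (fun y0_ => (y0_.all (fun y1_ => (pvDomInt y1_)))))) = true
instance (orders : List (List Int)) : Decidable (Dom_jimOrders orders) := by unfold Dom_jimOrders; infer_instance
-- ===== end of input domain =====

-- B replaces A's dict-of-buckets grouping + key sort + per-bucket sorts by one lexicographic
-- sort of the orders by (time, id) followed by a projection to the ids (objective: simpler).

-- ===== PORT A =====
def jimOrders (orders : List (List Int)) : List Int :=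
  let dict1 : PySem.Dict Int (List Int) :=
    (PySem.List.pyRange 0 (PySem.List.len orders)).foldl
      (fun d i =>
        if d.contains (PySem.List.pyGetD (PySem.List.pyGetD orders i []) 1 0) then
          d.modify (PySem.List.pyGetD (PySem.List.pyGetD orders i []) 1 0) []
            (fun v => v ++ [PySem.List.pyGetD (PySem.List.pyGetD orders i []) 0 0])
        else
          d.insert (PySem.List.pyGetD (PySem.List.pyGetD orders i []) 1 0)
            [PySem.List.pyGetD (PySem.List.pyGetD orders i []) 0 0])
      PySem.Dict.empty
  (PySem.List.sorted dict1.keys (fun x => x)).foldl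
    (fun nums key =>
      (PySem.List.pyRange 0
          (PySem.List.len (PySem.List.sorted (dict1.getD key []) (fun x => x)))).foldl
        (fun nums j =>
          nums ++ [PySem.List.pyGetD (PySem.List.sorted (dict1.getD key []) (fun x => x)) j 0])
        nums)
    []

-- ===== PORT B =====
def jimOrders_alt (orders : List (List Int)) : List Int :=
  (PySem.List.sorted2 orders (fun o => PySem.List.pyGetD o 1 0)
      (fun o => PySem.List.pyGetD o 0 0)).map
    (fun o => PySem.List.pyGetD o 0 0)

-- ===== PRECONDITION & SPEC =====
-- Pre_ excludes inputs on which the Python A raises IndexError: rows with fewer than 2 entries.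
def Pre_jimOrders (orders : List (List Int)) : Prop := ∀ o ∈ orders, 2 ≤ o.length
instance (orders : List (List Int)) : Decidable (Pre_jimOrders orders) := by
  unfold Pre_jimOrders; infer_instance
def pvWitness_jimOrders : List (List Int) := [[3, 1], [2, 1], [5, 0]]

def Spec_jimOrders (orders : List (List Int)) (out : List Int) : Prop := out = jimOrders_alt orders
instance (orders : List (List Int)) (out : List Int) : Decidable (Spec_jimOrders orders out) := by
  unfold Spec_jimOrders; infer_instance

-- ===== CLAIM (what is proved, stated in full; the proofs are below) =====
def Claim_equal_jimOrders : Prop :=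
  ∀ (orders : List (List Int)), Dom_jimOrders orders → Pre_jimOrders orders →
    Spec_jimOrders orders (jimOrders orders)

-- ===== LEMMAS AND PROOFS =====

-- the two projections A and B read from a row, a combined (time, id) key and its decoder
def pvT (o : List Int) : Int := PySem.List.pyGetD o 1 0
def pvI (o : List Int) : Int := PySem.List.pyGetD o 0 0
def pvPk (p : Int × Int) : Int := p.1 * 17179869184 + (p.2 + 2147483648)
def pvDec (n : Int) : Int := n % 17179869184 - 2147483648
def pvK (o : List Int) : Int × Int := (pvT o, pvI o)

def pvBnd (x : Int) : Prop := -2147483648 ≤ x ∧ x ≤ 2147483648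

lemma pv_bnd_getD (o : List Int) (h : ∀ x ∈ o, pvBnd x) (k : Nat) : pvBnd (o.getD k 0) := by
  by_cases hk : k < o.length
  · exact h _ (by rw [List.getD_eq_getElem o 0 hk]; exact List.getElem_mem hk)
  · rw [List.getD_eq_default o 0 (by omega)]; constructor <;> norm_num

lemma pv_dom_bnd (orders : List (List Int)) (hd : Dom_jimOrders orders)
    (o : List Int) (ho : o ∈ orders) : pvBnd (pvT o) ∧ pvBnd (pvI o) := by
  have h : ∀ x ∈ o, pvBnd x := by
    intro x hx
    have := (List.all_eq_true.mp hd) o ho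
    have := (List.all_eq_true.mp this) x hx
    simpa [pvDomInt, pvBnd] using this
  constructor
  · simpa [pvT, PySem.List.pyGetD_ofNat'] using pv_bnd_getD o h 1
  · simpa [pvI, PySem.List.pyGetD_ofNat'] using pv_bnd_getD o h 0

lemma pv_insertBy_congr {α : Type} (b1 b2 : α → α → Bool) (x : α) (acc : List α)
    (h : ∀ a ∈ acc, b1 x a = b2 x a) :
    PySem.List.insertBy b1 x acc = PySem.List.insertBy b2 x acc := by
  induction acc with
  | nil => rfl
  | cons y ys ih =>
    simp only [PySem.List.insertBy]
    rw [h y (by simp)]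
    split
    · rfl
    · rw [ih (fun a ha => h a (by simp [ha]))]

lemma pv_foldl_insertBy_congr {α : Type} (b1 b2 : α → α → Bool) (xs : List α) (acc : List α)
    (S : List α) (hacc : ∀ a ∈ acc, a ∈ S) (hxs : ∀ a ∈ xs, a ∈ S)
    (h : ∀ x ∈ S, ∀ a ∈ S, b1 x a = b2 x a) :
    xs.foldl (fun acc x => PySem.List.insertBy b1 x acc) acc
      = xs.foldl (fun acc x => PySem.List.insertBy b2 x acc) acc := by
  induction xs generalizing acc with
  | nil => rfl
  | cons x xs ih =>
    simp only [List.foldl_cons]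
    have hx : x ∈ S := hxs x (by simp)
    rw [pv_insertBy_congr b1 b2 x acc (fun a ha => h x hx a (hacc a ha))]
    exact ih _ (fun a ha => by
      rcases (PySem.List.mem_insertBy b2 x a acc).mp ha with rfl | ha
      · exact hx
      · exact hacc a ha) (fun a ha => hxs a (by simp [ha]))

-- B's lexicographic two-key sort is the sort by the combined key pvPk ∘ pvK, on bounded inputs
lemma pv_sorted2_eq_sorted (orders : List (List Int)) (hd : Dom_jimOrders orders) :
    PySem.List.sorted2 orders pvT pvI = PySem.List.sorted orders (fun o => pvPk (pvK o)) := by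
  rw [PySem.List.sorted_eq_foldl_insertBy]
  show orders.foldl (fun acc x => PySem.List.insertBy
      (fun a b => decide (pvT a < pvT b) || (!decide (pvT b < pvT a) && decide (pvI a < pvI b)))
      x acc) [] = _
  refine pv_foldl_insertBy_congr _ _ orders [] orders (by simp) (fun a ha => ha) ?_
  intro x hx a ha
  obtain ⟨⟨hxt1, hxt2⟩, hxi1, hxi2⟩ := pv_dom_bnd orders hd x hx
  obtain ⟨⟨hat1, hat2⟩, hai1, hai2⟩ := pv_dom_bnd orders hd a ha
  by_cases h1 : pvT x < pvT a <;> by_cases h2 : pvT a < pvT x <;> by_cases h3 : pvI x < pvI a <;>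
    simp only [h1, h2, h3, decide_true, decide_false, Bool.true_or, Bool.false_or,
      Bool.not_true, Bool.not_false, Bool.false_and, Bool.true_and, Bool.or_false,
      pvPk, pvK] <;>
    simp only [Bool.true_eq, Bool.false_eq, decide_eq_true_eq, decide_eq_false_iff_not] <;>
    omega

lemma pv_dec_pk (c x : Int) (h : pvBnd x) : pvDec (pvPk (c, x)) = x := by
  simp only [pvDec, pvPk, pvBnd] at *
  omega

-- B's output is (the canonical sorted combined-key list) decoded
lemma pv_alt_eq (orders : List (List Int)) (hd : Dom_jimOrders orders) :
    jimOrders_alt orders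
      = (PySem.List.sorted ((orders.map pvK).map pvPk) (fun x => x)).map pvDec := by
  have h1 : jimOrders_alt orders = (PySem.List.sorted2 orders pvT pvI).map pvI := rfl
  rw [h1, pv_sorted2_eq_sorted orders hd]
  have h2 : PySem.List.sorted ((orders.map pvK).map pvPk) (fun x => x)
      = (PySem.List.sorted orders (fun o => pvPk (pvK o))).map (fun o => pvPk (pvK o)) := by
    apply PySem.List.sorted_id_eq_of_perm_of_pairwise
    · rw [List.map_map]
      exact (PySem.List.sorted_perm orders (fun o => pvPk (pvK o)) false).map _
    · exact (PySem.List.sorted_pairwise orders (fun o => pvPk (pvK o))).map _ (fun a b h => h)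
  rw [h2, List.map_map]
  apply List.map_congr_left
  intro o ho
  have ho' : o ∈ orders := (PySem.List.mem_sorted _ _ _ o).mp ho
  have := (pv_dom_bnd orders hd o ho').2
  simp only [Function.comp_apply]
  rw [show pvPk (pvK o) = pvPk (pvT o, pvI o) from rfl, pv_dec_pk _ _ this]

-- the dict built by A's first loop
def pvBucket (orders : List (List Int)) (c : Int) : List Int :=
  (((orders.map pvK).filter (fun p => p.1 == c)).map (fun p => p.2))

lemma pv_dict_loop (orders : List (List Int)) :
    (PySem.List.pyRange 0 (PySem.List.len orders)).foldl
      (fun d i =>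
        if d.contains (PySem.List.pyGetD (PySem.List.pyGetD orders i []) 1 0) then
          d.modify (PySem.List.pyGetD (PySem.List.pyGetD orders i []) 1 0) []
            (fun v => v ++ [PySem.List.pyGetD (PySem.List.pyGetD orders i []) 0 0])
        else
          d.insert (PySem.List.pyGetD (PySem.List.pyGetD orders i []) 1 0)
            [PySem.List.pyGetD (PySem.List.pyGetD orders i []) 0 0])
      PySem.Dict.empty
    = orders.foldl (fun d o => d.modify (pvT o) [] (fun v => v ++ [pvI o])) PySem.Dict.empty := by
  rw [PySem.List.foldl_pyRange_pyGetD orders ([] : List Int)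
    (fun d o =>
      if d.contains (PySem.List.pyGetD o 1 0) then
        d.modify (PySem.List.pyGetD o 1 0) [] (fun v => v ++ [PySem.List.pyGetD o 0 0])
      else
        d.insert (PySem.List.pyGetD o 1 0) [PySem.List.pyGetD o 0 0])
    PySem.Dict.empty (le_refl 0)]
  simp only [Int.toNat_zero, List.drop_zero]
  congr 1
  funext d o
  split
  · rfl
  · rename_i hnc
    have hnc' : d.contains (PySem.List.pyGetD o 1 0) = false := by simpa using hnc
    simp only [pvT, pvI, PySem.Dict.modify,
      PySem.Dict.getD_of_not_contains d _ hnc', List.nil_append]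

lemma pv_dict_getD (orders : List (List Int)) (c : Int) :
    (orders.foldl (fun d o => d.modify (pvT o) [] (fun v => v ++ [pvI o]))
        PySem.Dict.empty).getD c []
      = pvBucket orders c := by
  have : orders.foldl (fun d o => d.modify (pvT o) [] (fun v => v ++ [pvI o])) PySem.Dict.empty
      = (orders.map pvK).foldl (fun d p => d.modify p.1 [] (fun v => v ++ [p.2]))
          PySem.Dict.empty := by
    simp only [List.foldl_map]
    rfl
  rw [this, PySem.Dict.getD_foldl_modify_append, PySem.Dict.getD_empty, List.nil_append]
  rfl

lemma pv_dict_keys (orders : List (List Int)) :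
    (orders.foldl (fun d o => d.modify (pvT o) [] (fun v => v ++ [pvI o]))
        PySem.Dict.empty).keys
      = PySem.Set.ofList (orders.map pvT) := by
  rw [show (fun (d : PySem.Dict Int (List Int)) (o : List Int) =>
        d.modify (pvT o) [] (fun v => v ++ [pvI o]))
      = (fun d o => d.modify (pvT o) [] ((fun (_ : PySem.Dict Int (List Int)) (o : List Int)
          (v : List Int) => v ++ [pvI o]) d o)) from rfl,
    PySem.Dict.keys_foldl_modify_key, PySem.Dict.keys_empty]
  rfl

-- A's output as a flatMap of sorted buckets over the sorted distinct times
lemma pv_a_eq_flatMap (orders : List (List Int)) :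
    jimOrders orders
      = (PySem.List.sorted (PySem.Set.ofList (orders.map pvT)) (fun x => x)).flatMap
          (fun c => PySem.List.sorted (pvBucket orders c) (fun x => x)) := by
  show ((PySem.List.sorted _ (fun x => x)).foldl _ []) = _
  rw [pv_dict_loop, pv_dict_keys]
  have hinner : ∀ (d : List Int) (nums : List Int),
      (PySem.List.pyRange 0 (PySem.List.len (PySem.List.sorted d (fun x => x)))).foldl
        (fun nums j => nums ++ [PySem.List.pyGetD (PySem.List.sorted d (fun x => x)) j 0]) nums
      = nums ++ PySem.List.sorted d (fun x => x) := by
    intro d nums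
    rw [PySem.List.foldl_pyRange_pyGetD (PySem.List.sorted d (fun x => x)) (0 : Int)
      (fun acc x => acc ++ [x]) nums (le_refl 0)]
    simp only [Int.toNat_zero, List.drop_zero]
    exact PySem.List.foldl_append_singleton _ _
  calc (PySem.List.sorted (PySem.Set.ofList (orders.map pvT)) (fun x => x)).foldl
        (fun nums key =>
          (PySem.List.pyRange 0 (PySem.List.len (PySem.List.sorted
            ((orders.foldl (fun d o => d.modify (pvT o) [] (fun v => v ++ [pvI o]))
              PySem.Dict.empty).getD key []) (fun x => x)))).foldl
            (fun nums j => nums ++ [PySem.List.pyGetD (PySem.List.sorted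
              ((orders.foldl (fun d o => d.modify (pvT o) [] (fun v => v ++ [pvI o]))
                PySem.Dict.empty).getD key []) (fun x => x)) j 0]) nums) []
      = (PySem.List.sorted (PySem.Set.ofList (orders.map pvT)) (fun x => x)).foldl
        (fun nums key => nums ++ PySem.List.sorted (pvBucket orders key) (fun x => x)) [] := by
        congr 1
        funext nums key
        rw [hinner, pv_dict_getD]
    _ = _ := by rw [PySem.List.foldl_append_eq_flatMap, List.nil_append]

-- the distinct-times flatMap of the filter groups is a permutation of the pair list
lemma pv_flatMap_filter_perm (S : List Int) (ps : List (Int × Int)) (hnd : S.Nodup)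
    (hcov : ∀ p ∈ ps, p.1 ∈ S) :
    (S.flatMap (fun c => ps.filter (fun p => p.1 == c))).Perm ps := by
  induction S generalizing ps with
  | nil =>
    have hps : ps = [] := by
      cases ps with
      | nil => rfl
      | cons p t => exact absurd (hcov p (by simp)) (by simp)
    subst hps; simp
  | cons c S ih =>
    have hS : S.Nodup := hnd.of_cons
    have hcns : c ∉ S := (List.nodup_cons.mp hnd).1
    have hsub : ∀ c' ∈ S, ps.filter (fun p => p.1 == c')
        = (ps.filter (fun p => !(p.1 == c))).filter (fun p => p.1 == c') := by
      intro c' hc'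
      rw [List.filter_filter]
      apply List.filter_congr
      intro p _
      by_cases h : p.1 = c'
      · have hne : ¬ c' = c := fun hc => hcns (hc ▸ hc')
        simp [h, hne]
      · simp [h]
    have hcovf : ∀ p ∈ ps.filter (fun p => !(p.1 == c)), p.1 ∈ S := by
      intro p hp
      have h1 : ¬ p.1 = c := by simpa using List.of_mem_filter hp
      have h2 := hcov p (List.mem_of_mem_filter hp)
      simp only [List.mem_cons] at h2
      tauto
    have hrec := ih (ps.filter (fun p => !(p.1 == c))) hS hcovf
    rw [List.flatMap_cons, List.flatMap_congr hsub]
    exact (hrec.append_left _).trans (List.filter_append_perm _ ps)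

-- bucket elements are bounded
lemma pv_bucket_bnd (orders : List (List Int)) (hd : Dom_jimOrders orders) (c : Int)
    (x : Int) (hx : x ∈ pvBucket orders c) : pvBnd x := by
  simp only [pvBucket, List.mem_map, List.mem_filter] at hx
  obtain ⟨p, ⟨hp, _⟩, rfl⟩ := hx
  obtain ⟨o, ho, rfl⟩ := hp
  exact (pv_dom_bnd orders hd o ho).2

-- the canonical combined-key sort, regrouped by time
lemma pv_canonical (orders : List (List Int)) (hd : Dom_jimOrders orders) :
    PySem.List.sorted ((orders.map pvK).map pvPk) (fun x => x)
      = (PySem.List.sorted (PySem.Set.ofList (orders.map pvT)) (fun x => x)).flatMap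
          (fun c => (PySem.List.sorted (pvBucket orders c) (fun x => x)).map
            (fun x => pvPk (c, x))) := by
  set S := PySem.List.sorted (PySem.Set.ofList (orders.map pvT)) (fun x => x) with hSdef
  have hSlt : S.Pairwise (fun a b => a < b) := PySem.List.sorted_ofList_pairwise_lt _
  have hSnd : S.Nodup := hSlt.imp (fun h => ne_of_lt h)
  apply PySem.List.sorted_id_eq_of_perm_of_pairwise
  · -- permutation
    have h1 : ∀ c, ((PySem.List.sorted (pvBucket orders c) (fun x => x)).map
        (fun x => pvPk (c, x))).Perm ((pvBucket orders c).map (fun x => pvPk (c, x))) :=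
      fun c => (PySem.List.sorted_perm _ _ false).map _
    have h2 : ∀ c, (pvBucket orders c).map (fun x => pvPk (c, x))
        = ((orders.map pvK).filter (fun p => p.1 == c)).map pvPk := by
      intro c
      simp only [pvBucket, List.map_map]
      apply List.map_congr_left
      intro p hp
      have hpc : p.1 = c := by simpa using (List.of_mem_filter hp)
      simp [Function.comp, pvPk, hpc]
    have h3 : (S.flatMap (fun c => (PySem.List.sorted (pvBucket orders c) (fun x => x)).map
          (fun x => pvPk (c, x)))).Perm
        (S.flatMap (fun c => ((orders.map pvK).filter (fun p => p.1 == c)).map pvPk)) := by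
      refine List.Perm.flatMap_left S ?_
      intro c _
      rw [← h2 c]
      exact h1 c
    refine h3.trans ?_
    rw [← List.map_flatMap]
    refine List.Perm.map pvPk ?_
    refine pv_flatMap_filter_perm S (orders.map pvK) hSnd ?_
    intro p hp
    obtain ⟨o, ho, rfl⟩ := List.mem_map.mp hp
    rw [hSdef, PySem.List.mem_sorted, PySem.Set.mem_ofList]
    exact List.mem_map.mpr ⟨o, ho, rfl⟩
  · -- sortedness
    rw [List.pairwise_flatMap]
    constructor
    · intro c _
      apply (PySem.List.sorted_pairwise (pvBucket orders c) (fun x => x)).map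
      intro a b hab
      simp only [pvPk]
      omega
    · apply hSlt.imp_of_mem
      intro c1 c2 hc1 hc2 hlt x hx y hy
      obtain ⟨a, ha, rfl⟩ := List.mem_map.mp hx
      obtain ⟨b, hb, rfl⟩ := List.mem_map.mp hy
      have hab : pvBnd a := pv_bucket_bnd orders hd c1 a ((PySem.List.mem_sorted _ _ _ _).mp ha)
      have hbb : pvBnd b := pv_bucket_bnd orders hd c2 b ((PySem.List.mem_sorted _ _ _ _).mp hb)
      simp only [pvPk, pvBnd] at *
      nlinarith [hlt]

-- ===== VERDICT (by name: the statement is the Claim_ definition above) =====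
theorem jimOrders_spec : Claim_equal_jimOrders := by
  intro orders hd _
  unfold Spec_jimOrders
  rw [pv_alt_eq orders hd, pv_a_eq_flatMap orders, pv_canonical orders hd, List.map_flatMap]
  apply List.flatMap_congr
  intro c _
  rw [List.map_map]
  symm
  refine (List.map_congr_left ?_).trans (List.map_id _)
  intro x hx
  simp only [Function.comp_apply, id]
  exact pv_dec_pk c x (pv_bucket_bnd orders hd c x ((PySem.List.mem_sorted _ _ _ _).mp hx))
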